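-- pv_equiv track=rewrite | github.com/oculi-s/Programmers | 문자열의 아름다움.py | solution
-- ===== SOURCE A (Python) =====
-- def solution(s):
--     N = len(s)
--     if s == s[0]*N:
--         return 0
--     else:
--         V = [[j-i for j in range(N)] for i in range(N)]
--         t = 0
--         for i in range(len(s)):
--             for j in range(i+1,len(s)):
--                 if s[j] == s[i]:
--                     V[i][j] = V[i][j-1]
--             t += sum(V[i][i:])
--         return t
-- ===== SOURCE B (Python) =====
-- def solution(s):
--     N = len(s)
--     total = 0
--     for m in range(N):
--         total += m * (m + 1) // 2
--     # runs[k] = length of the maximal block of equal characters starting at k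
--     runs = [0] * N
--     for k in range(N - 1, -1, -1):
--         runs[k] = runs[k + 1] + 1 if k + 1 < N and s[k + 1] == s[k] else 1
--     seen = {}
--     sub = 0
--     for k in range(N):
--         sub += runs[k] * seen.get(s[k], 0)
--         seen[s[k]] = seen.get(s[k], 0) + 1
--     return total - sub
-- ===== Notes on version B (the rewrite author's own statement) =====
-- stated objective: faster
-- what changed: A builds an N x N matrix of pair distances and rewrites/sums each row; B makes one linear pass: total answer = sum of triangular numbers minus, for each position k, (length of the equal-character run starting at k) times the number of earlier occurrences of s[k], counted with a dictionary.
import Mathlib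
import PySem

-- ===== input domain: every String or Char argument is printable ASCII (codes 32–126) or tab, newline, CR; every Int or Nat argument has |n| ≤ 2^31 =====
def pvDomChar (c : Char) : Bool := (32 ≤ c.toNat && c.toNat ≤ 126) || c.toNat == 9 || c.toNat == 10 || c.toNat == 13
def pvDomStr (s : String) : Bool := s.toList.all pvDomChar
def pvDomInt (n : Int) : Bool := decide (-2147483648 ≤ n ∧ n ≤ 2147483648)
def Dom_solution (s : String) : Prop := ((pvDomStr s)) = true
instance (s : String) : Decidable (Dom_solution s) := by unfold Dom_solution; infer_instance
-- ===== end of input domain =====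

-- B replaces A's quadratic matrix of pair distances by a linear pass: a triangular-number
-- total minus, for each position, its run length times the number of earlier equal characters.

-- ===== PORT A =====
def solution (s : String) : Int :=
  let cs := s.toList
  let N := cs.length
  if cs = List.replicate N (cs.getD 0 ' ') then 0
  else
    let V0 : List (List Int) := (List.range N).map (fun (i : Nat) => (List.range N).map (fun (j : Nat) => (j : Int) - (i : Int)))
    let st := (List.range N).foldl (fun (st : List (List Int) × Int) i =>
      let V1 := (List.range' (i+1) (N - (i+1))).foldl (fun V j =>
          if cs.getD j ' ' = cs.getD i ' ' then
            V.set i ((V.getD i []).set j ((V.getD i []).getD (j-1) 0))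
          else V) st.1
      (V1, st.2 + ((V1.getD i []).drop i).sum)) (V0, 0)
    st.2

-- ===== PORT B =====
-- runs[k] = length of the maximal block of equal characters starting at k (Source B's backward loop,
-- rendered as the structural right-to-left recursion)
def buildRuns : List Char → List Int
  | [] => []
  | c :: rest =>
    let rs := buildRuns rest
    (match rest with
     | [] => (1 : Int)
     | d :: _ => if d = c then rs.headD 0 + 1 else 1) :: rs

def solution_alt (s : String) : Int :=
  let cs := s.toList
  let N := cs.length
  let total := (List.range N).foldl (fun a m => a + ((m * (m + 1) / 2 : Nat) : Int)) 0
  let runs := buildRuns cs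
  let st := (List.range N).foldl (fun (st : PySem.Dict Char Int × Int) k =>
      let c := cs.getD k ' '
      (st.1.insert c (st.1.getD c 0 + 1), st.2 + runs.getD k 0 * st.1.getD c 0)) (PySem.Dict.empty, 0)
  total - st.2

-- ===== PRECONDITION & SPEC =====
-- Pre_ excludes only the empty string, on which A raises IndexError (s[0]).
def Pre_solution (s : String) : Prop := s ≠ ""
instance (s : String) : Decidable (Pre_solution s) := by unfold Pre_solution; infer_instance
def pvWitness_solution : String := "ab"

def Spec_solution (s : String) (out : Int) : Prop := out = solution_alt s
instance (s : String) (out : Int) : Decidable (Spec_solution s out) := by unfold Spec_solution; infer_instance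

-- ===== CLAIM (what is proved, stated in full; the proofs are below) =====
def Claim_equal_solution : Prop := ∀ (s : String), Dom_solution s → Pre_solution s → Spec_solution s (solution s)

-- ===== LEMMAS AND PROOFS =====

-- character at k (out-of-range default, only ever used at k < cs.length)
def lg (cs : List Char) (k : Nat) : Char := cs.getD k ' '

-- run length starting at k (mathematical form of Source B's runs[k])
def rl (cs : List Char) (k : Nat) : Nat :=
  if h : k + 1 < cs.length ∧ cs.getD (k+1) ' ' = cs.getD k ' ' then rl cs (k+1) + 1 else 1
termination_by cs.length - k
decreasing_by omega

-- the value A's inner loop leaves at V[i][j] (for i ≤ j): 0 at j = i, else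
-- j - i if s[j] differs from s[i], else the value at j-1
def gfun (cs : List Char) (i : Nat) : Nat → Int
  | 0 => 0
  | (j+1) => if j + 1 ≤ i then 0
             else if cs.getD (j+1) ' ' = cs.getD i ' ' then gfun cs i j
             else ((j : Int) + 1) - (i : Int)

-- row i of A's matrix after the inner loop has processed columns i+1 .. m
def rowUpto (cs : List Char) (i m : Nat) : List Int :=
  (List.range cs.length).map (fun j => if i < j ∧ j ≤ m then gfun cs i j else (j : Int) - (i : Int))

-- total value both programs compute
def sumG (cs : List Char) : Int :=
  ∑ i ∈ Finset.range cs.length, ∑ j ∈ Finset.Ico i cs.length, gfun cs i j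

lemma rl_pos (cs : List Char) (k : Nat) : 1 ≤ rl cs k := by
  rw [rl]; split <;> omega

lemma rl_le (cs : List Char) (k : Nat) (h : k < cs.length) : k + rl cs k ≤ cs.length := by
  rw [rl]
  split
  · next hc => have := rl_le cs (k+1) hc.1; omega
  · omega
termination_by cs.length - k
decreasing_by omega

lemma rl_covers (cs : List Char) (k m : Nat) (h1 : k ≤ m) (h2 : m < k + rl cs k)
    (h3 : m < cs.length) : lg cs m = lg cs k := by
  rcases Nat.eq_or_lt_of_le h1 with rfl | hlt
  · rfl
  · rw [rl] at h2
    split at h2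
    · next hc =>
      have ih := rl_covers cs (k+1) m hlt (by omega) h3
      rw [ih]; exact hc.2
    · omega
termination_by cs.length - k
decreasing_by omega

lemma rl_stop (cs : List Char) (k : Nat) :
    k + rl cs k = cs.length ∨ (k + rl cs k < cs.length ∧ lg cs (k + rl cs k) ≠ lg cs k) ∨ cs.length ≤ k := by
  by_cases hk : k < cs.length
  · rw [rl]
    split
    · next hc =>
      rcases rl_stop cs (k+1) with h | ⟨h1, h2⟩ | h
      · left; omega
      · right; left
        refine ⟨by omega, ?_⟩
        have : k + (rl cs (k+1) + 1) = k + 1 + rl cs (k+1) := by omega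
        rw [this]
        intro hEq
        exact h2 (hEq.trans hc.2.symm)
      · omega
    · next hc =>
      rcases Nat.eq_or_lt_of_le hk with h | h
      · left; omega
      · right; left
        refine ⟨by omega, ?_⟩
        intro hEq
        exact hc ⟨by omega, by simpa [lg] using hEq⟩
  · right; right; omega
termination_by cs.length - k
decreasing_by omega

-- ===== A-side characterization =====

lemma gfun_succ (cs : List Char) (i j : Nat) :
    gfun cs i (j+1) = if j + 1 ≤ i then 0
      else if cs.getD (j+1) ' ' = cs.getD i ' ' then gfun cs i j
      else ((j : Int) + 1) - (i : Int) := rfl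

lemma gfun_of_le (cs : List Char) (i j : Nat) (h : j ≤ i) : gfun cs i j = 0 := by
  cases j with
  | zero => rfl
  | succ j => rw [gfun_succ, if_pos h]

lemma getD_set_self' (V : List (List Int)) (i : Nat) (r : List Int) (h : i < V.length) :
    (V.set i r).getD i [] = r := by
  rw [List.getD_eq_getElem?_getD, List.getElem?_set_self h]; rfl

lemma getD_set_ne' (V : List (List Int)) (i j : Nat) (r : List Int) (h : i ≠ j) :
    (V.set i r).getD j [] = V.getD j [] := by
  rw [List.getD_eq_getElem?_getD, List.getElem?_set_ne h, List.getD_eq_getElem?_getD]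

lemma set_map_range (N : Nat) (f : Nat → Int) (a : Nat) (v : Int) :
    ((List.range N).map f).set a v = (List.range N).map (fun j => if j = a then v else f j) := by
  apply List.ext_getElem (by simp)
  intro n h1 h2
  simp only [List.getElem_set, List.getElem_map, List.getElem_range]
  by_cases hn : a = n
  · subst hn; simp
  · rw [if_neg hn, if_neg (Ne.symm hn)]

lemma rowUpto_self (cs : List Char) (i : Nat) :
    rowUpto cs i i = (List.range cs.length).map (fun (j : Nat) => (j : Int) - (i : Int)) := by
  unfold rowUpto
  apply List.map_congr_left; intro j _
  rw [if_neg (by omega)]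

lemma rowUpto_step_ne (cs : List Char) (i m : Nat) (him : i ≤ m)
    (hne : cs.getD (m+1) ' ' ≠ cs.getD i ' ') :
    rowUpto cs i (m+1) = rowUpto cs i m := by
  unfold rowUpto
  apply List.map_congr_left; intro j _
  by_cases hj : i < j ∧ j ≤ m
  · rw [if_pos ⟨hj.1, by omega⟩, if_pos hj]
  · by_cases hj2 : j = m + 1
    · subst hj2
      rw [if_pos ⟨by omega, le_rfl⟩, if_neg (by omega), gfun_succ, if_neg (by omega), if_neg hne]
      push_cast; ring
    · rw [if_neg (fun h => hj ⟨h.1, by omega⟩), if_neg hj]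

lemma rowUpto_step_set (cs : List Char) (i m : Nat) (him : i ≤ m) (hm1 : m + 1 < cs.length)
    (heq : cs.getD (m+1) ' ' = cs.getD i ' ') :
    (rowUpto cs i m).set (m+1) ((rowUpto cs i m).getD (m+1-1) 0) = rowUpto cs i (m+1) := by
  have hg : (rowUpto cs i m).getD (m+1-1) 0 = gfun cs i m := by
    show (rowUpto cs i m).getD m 0 = gfun cs i m
    unfold rowUpto
    rw [PySem.List.getD_map_range _ _ _ _ (by omega)]
    by_cases him' : i < m
    · rw [if_pos ⟨him', le_rfl⟩]
    · have hmi : m = i := by omega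
      subst hmi
      rw [if_neg (by omega), gfun_of_le _ _ _ le_rfl]; ring
  rw [hg]
  unfold rowUpto
  rw [set_map_range]
  apply List.map_congr_left; intro j _
  by_cases hj2 : j = m + 1
  · subst hj2
    rw [if_pos rfl, if_pos ⟨by omega, le_rfl⟩, gfun_succ, if_neg (by omega), if_pos heq]
  · rw [if_neg hj2]
    by_cases hj3 : i < j ∧ j ≤ m
    · rw [if_pos hj3, if_pos ⟨hj3.1, by omega⟩]
    · rw [if_neg hj3, if_neg (fun h => hj3 ⟨h.1, by omega⟩)]

lemma innerLoop (cs : List Char) (i : Nat) :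
    ∀ (c m : Nat) (V : List (List Int)), i ≤ m → m + c < cs.length →
    V.length = cs.length → V.getD i [] = rowUpto cs i m →
    (((List.range' (m+1) c).foldl (fun V j =>
        if cs.getD j ' ' = cs.getD i ' ' then
          V.set i ((V.getD i []).set j ((V.getD i []).getD (j-1) 0))
        else V) V).length = cs.length ∧
     ((List.range' (m+1) c).foldl (fun V j =>
        if cs.getD j ' ' = cs.getD i ' ' then
          V.set i ((V.getD i []).set j ((V.getD i []).getD (j-1) 0))
        else V) V).getD i [] = rowUpto cs i (m+c) ∧
     ∀ i', i' ≠ i → ((List.range' (m+1) c).foldl (fun V j =>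
        if cs.getD j ' ' = cs.getD i ' ' then
          V.set i ((V.getD i []).set j ((V.getD i []).getD (j-1) 0))
        else V) V).getD i' [] = V.getD i' []) := by
  intro c
  induction c with
  | zero =>
    intro m V h1 h2 h3 h4
    exact ⟨h3, by simpa using h4, fun i' _ => rfl⟩
  | succ c ih =>
    intro m V h1 h2 h3 h4
    rw [List.range'_succ]
    simp only [List.foldl_cons]
    have hstep : (if cs.getD (m+1) ' ' = cs.getD i ' ' then
          V.set i ((V.getD i []).set (m+1) ((V.getD i []).getD (m+1-1) 0))
        else V).length = cs.length ∧
        (if cs.getD (m+1) ' ' = cs.getD i ' ' then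
          V.set i ((V.getD i []).set (m+1) ((V.getD i []).getD (m+1-1) 0))
        else V).getD i [] = rowUpto cs i (m+1) ∧
        ∀ i', i' ≠ i → (if cs.getD (m+1) ' ' = cs.getD i ' ' then
          V.set i ((V.getD i []).set (m+1) ((V.getD i []).getD (m+1-1) 0))
        else V).getD i' [] = V.getD i' [] := by
      by_cases heq : cs.getD (m+1) ' ' = cs.getD i ' '
      · rw [if_pos heq, h4]
        refine ⟨by simpa using h3, ?_, ?_⟩
        · rw [getD_set_self' _ _ _ (by omega), rowUpto_step_set cs i m h1 (by omega) heq]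
        · intro i' hne
          exact getD_set_ne' _ _ _ _ (Ne.symm hne)
      · rw [if_neg heq]
        exact ⟨h3, by rw [h4, rowUpto_step_ne cs i m h1 heq], fun i' _ => rfl⟩
    obtain ⟨s1, s2, s3⟩ := hstep
    have hrest := ih (m+1) _ (by omega) (by omega) s1 s2
    refine ⟨hrest.1, ?_, ?_⟩
    · rw [hrest.2.1]; congr 1; omega
    · intro i' hne
      rw [hrest.2.2 i' hne, s3 i' hne]

lemma rowSum (cs : List Char) (i : Nat) (hi : i < cs.length) :
    ((rowUpto cs i (cs.length - 1)).drop i).sum = ∑ j ∈ Finset.Ico i cs.length, gfun cs i j := by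
  unfold rowUpto
  rw [← List.map_drop, List.range_eq_range', List.drop_range']
  have h0 : (0 + i * 1) = i := by omega
  rw [h0, List.range'_eq_map_range, List.map_map]
  have hL : ((List.range (cs.length - i)).map
      ((fun j => if i < j ∧ j ≤ cs.length - 1 then gfun cs i j else (j : Int) - (i : Int)) ∘ (i + ·))).sum
      = ∑ k ∈ Finset.range (cs.length - i),
          (if i < i + k ∧ i + k ≤ cs.length - 1 then gfun cs i (i + k) else ((i + k : Nat) : Int) - (i : Int)) := rfl
  rw [hL, Finset.sum_Ico_eq_sum_range]
  apply Finset.sum_congr rfl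
  intro k hk
  have hk' : k < cs.length - i := Finset.mem_range.mp hk
  cases k with
  | zero =>
    rw [if_neg (by omega), gfun_of_le _ _ _ (by omega)]
    push_cast; ring
  | succ k =>
    rw [if_pos ⟨by omega, by omega⟩]

lemma outerLoop (cs : List Char) (n : Nat) (hn : n ≤ cs.length) :
    ∃ V, (List.range n).foldl
        (fun (st : List (List Int) × Int) i =>
          ((List.range' (i+1) (cs.length - (i+1))).foldl (fun V j =>
              if cs.getD j ' ' = cs.getD i ' ' then
                V.set i ((V.getD i []).set j ((V.getD i []).getD (j-1) 0))
              else V) st.1,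
           st.2 + ((((List.range' (i+1) (cs.length - (i+1))).foldl (fun V j =>
              if cs.getD j ' ' = cs.getD i ' ' then
                V.set i ((V.getD i []).set j ((V.getD i []).getD (j-1) 0))
              else V) st.1).getD i []).drop i).sum))
        ((List.range cs.length).map (fun (i : Nat) => (List.range cs.length).map (fun (j : Nat) => (j : Int) - (i : Int))), 0)
      = (V, ∑ i ∈ Finset.range n, ∑ j ∈ Finset.Ico i cs.length, gfun cs i j)
      ∧ V.length = cs.length
      ∧ ∀ i', n ≤ i' → i' < cs.length → V.getD i' [] = rowUpto cs i' i' := by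
  induction n with
  | zero =>
    refine ⟨(List.range cs.length).map (fun (i : Nat) => (List.range cs.length).map
      (fun (j : Nat) => (j : Int) - (i : Int))), by simp, by simp, ?_⟩
    intro i' _ hi'
    rw [PySem.List.getD_map_range _ _ _ _ hi', rowUpto_self]
  | succ n ih =>
    obtain ⟨V, hf, hlen, hrows⟩ := ih (by omega)
    have hnN : n < cs.length := by omega
    rw [List.range_succ, List.foldl_append, hf]
    simp only [List.foldl_cons, List.foldl_nil]
    have hinner := innerLoop cs n (cs.length - (n+1)) n V le_rfl (by omega) hlen (hrows n le_rfl hnN)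
    refine ⟨_, ?_, hinner.1, ?_⟩
    · have hsum : ((((List.range' (n+1) (cs.length - (n+1))).foldl (fun V j =>
            if cs.getD j ' ' = cs.getD n ' ' then
              V.set n ((V.getD n []).set j ((V.getD n []).getD (j-1) 0))
            else V) V).getD n []).drop n).sum = ∑ j ∈ Finset.Ico n cs.length, gfun cs n j := by
        rw [hinner.2.1, show n + (cs.length - (n+1)) = cs.length - 1 by omega]
        exact rowSum cs n hnN
      rw [hsum, Finset.sum_range_succ]
    · intro i' hi1 hi2
      rw [hinner.2.2 i' (by omega), hrows i' (by omega) hi2]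

lemma gfun_allsame (cs : List Char)
    (h : ∀ a, a < cs.length → cs.getD a ' ' = cs.getD 0 ' ') (i j : Nat)
    (hi : i < cs.length) (hj : j < cs.length) : gfun cs i j = 0 := by
  induction j with
  | zero => rfl
  | succ j ihj =>
    rw [gfun_succ]
    by_cases hji : j + 1 ≤ i
    · rw [if_pos hji]
    · rw [if_neg hji, if_pos (by rw [h (j+1) hj, h i hi]), ihj (by omega)]

lemma solutionA_eq (s : String) : solution s = sumG s.toList := by
  unfold solution
  dsimp only
  by_cases hrep : s.toList = List.replicate s.toList.length (s.toList.getD 0 ' ')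
  · rw [if_pos hrep]
    unfold sumG
    symm
    apply Finset.sum_eq_zero
    intro i hi
    apply Finset.sum_eq_zero
    intro j hj
    apply gfun_allsame s.toList ?_ i j (Finset.mem_range.mp hi) (Finset.mem_Ico.mp hj).2
    intro a ha
    have h0 : 0 < s.toList.length := by omega
    conv_lhs => rw [hrep]
    conv_rhs => rw [hrep]
    rw [List.getD_replicate _ (by simpa using ha), List.getD_replicate _ (by simpa using h0)]
  · rw [if_neg hrep]
    obtain ⟨V, hf, _, _⟩ := outerLoop s.toList s.toList.length le_rfl
    rw [hf]
    rfl

-- ===== B-side characterization =====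

lemma rl_cons (c : Char) (rest : List Char) (k : Nat) : rl (c :: rest) (k + 1) = rl rest k := by
  conv_lhs => rw [rl]
  conv_rhs => rw [rl]
  by_cases hc : k + 1 < rest.length ∧ rest.getD (k+1) ' ' = rest.getD k ' '
  · rw [dif_pos (by exact ⟨by simpa using hc.1, hc.2⟩), dif_pos hc, rl_cons c rest (k+1)]
  · rw [dif_neg (fun h => hc ⟨by simpa using h.1, h.2⟩), dif_neg hc]
termination_by rest.length - k
decreasing_by omega

lemma buildRuns_getD (cs : List Char) (k : Nat) (hk : k < cs.length) :
    (buildRuns cs).getD k 0 = ((rl cs k : Nat) : Int) := by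
  induction cs generalizing k with
  | nil => simp at hk
  | cons c rest ih =>
    match k with
    | Nat.succ k =>
      have hk' : k < rest.length := by simpa using hk
      have hstep : (buildRuns (c :: rest)).getD (k+1) 0 = (buildRuns rest).getD k 0 := rfl
      rw [hstep, ih k hk', rl_cons]
    | 0 =>
      cases rest with
      | nil => simp [buildRuns, rl]
      | cons d rest' =>
        have hb0 : (buildRuns (d :: rest')).headD 0 = ((rl (d :: rest') 0 : Nat) : Int) := by
          simpa [buildRuns, List.getD] using ih 0 (by simp)
        show (if d = c then (buildRuns (d :: rest')).headD 0 + 1 else 1) = _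
        rw [rl]
        by_cases hd : d = c
        · rw [if_pos hd, dif_pos (⟨by simp, by simpa [List.getD] using hd⟩ :
            0 + 1 < (c :: d :: rest').length ∧ (c :: d :: rest').getD (0+1) ' ' = (c :: d :: rest').getD 0 ' '),
            rl_cons, hb0]
          push_cast; ring
        · rw [if_neg hd, dif_neg (by intro h; exact hd (by simpa [List.getD] using h.2))]
          simp

lemma loopB (cs : List Char) (runs : List Int) (n : Nat) (hn : n ≤ cs.length) :
    (List.range n).foldl (fun (st : PySem.Dict Char Int × Int) k =>
      (st.1.insert (cs.getD k ' ') (st.1.getD (cs.getD k ' ') 0 + 1),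
       st.2 + runs.getD k 0 * st.1.getD (cs.getD k ' ') 0)) (PySem.Dict.empty, 0)
    = ((cs.take n).foldl (fun d x => d.insert x (d.getD x 0 + 1)) PySem.Dict.empty,
       ∑ k ∈ Finset.range n, runs.getD k 0 * ((cs.take k).count (cs.getD k ' ') : Int)) := by
  induction n with
  | zero => simp
  | succ n ih =>
    rw [List.range_succ, List.foldl_append, ih (by omega)]
    simp only [List.foldl_cons, List.foldl_nil]
    have hget : cs.getD n ' ' = cs[n]'(by omega) := List.getD_eq_getElem cs ' ' (by omega)
    have htake : cs.take (n+1) = cs.take n ++ [cs[n]'(by omega)] :=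
      List.take_succ_eq_append_getElem (by omega)
    have hcnt : (((cs.take n).foldl (fun d x => d.insert x (d.getD x 0 + 1))
        PySem.Dict.empty).getD (cs.getD n ' ') 0) = ((cs.take n).count (cs.getD n ' ') : Int) := by
      rw [PySem.Dict.getD_foldl_insert_add_one]
      simp
    refine Prod.ext ?_ ?_
    · show _ = (cs.take (n+1)).foldl _ _
      rw [htake, List.foldl_append]
      have h2 : cs[n]? = some (cs[n]'(by omega)) := List.getElem?_eq_getElem _
      simp [List.getD_eq_getElem?_getD, h2]
    · show _ = ∑ k ∈ Finset.range (n+1), _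
      rw [Finset.sum_range_succ, hcnt]

lemma solutionB_eq (s : String) :
    solution_alt s =
      (∑ m ∈ Finset.range s.toList.length, ((m * (m + 1) / 2 : Nat) : Int)) -
      ∑ k ∈ Finset.range s.toList.length,
        (rl s.toList k : Int) * ((s.toList.take k).count (lg s.toList k) : Int) := by
  unfold solution_alt
  dsimp only
  rw [PySem.List.foldl_add, loopB s.toList (buildRuns s.toList) s.toList.length le_rfl]
  have htot : ((List.range s.toList.length).map (fun m => ((m * (m + 1) / 2 : Nat) : Int))).sum
      = ∑ m ∈ Finset.range s.toList.length, ((m * (m + 1) / 2 : Nat) : Int) := rfl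
  rw [zero_add, htot]
  congr 1
  dsimp only
  apply Finset.sum_congr rfl
  intro k hk
  rw [buildRuns_getD s.toList k (Finset.mem_range.mp hk)]
  rfl

-- ===== bridge =====

-- the "trailing run" part of a matrix entry: hfun i j = (j - i) - V[i][j]
def hfun (cs : List Char) (i j : Nat) : Int := ((j : Int) - (i : Int)) - gfun cs i j

lemma hfun_count (cs : List Char) (i j : Nat) (hij : i ≤ j) (hj : j < cs.length) :
    hfun cs i j = ∑ k ∈ Finset.Ico (i+1) (j+1),
      (if cs.getD k ' ' = cs.getD i ' ' ∧ j < k + rl cs k then (1:Int) else 0) := by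
  revert hj
  induction j, hij using Nat.le_induction with
  | base =>
    intro hj
    simp [hfun, gfun_of_le cs i i le_rfl]
  | succ j hij ih =>
    intro hj1
    by_cases heq : cs.getD (j+1) ' ' = cs.getD i ' '
    · have hg : gfun cs i (j+1) = gfun cs i j := by
        rw [gfun_succ, if_neg (by omega), if_pos heq]
      have hh : hfun cs i (j+1) = hfun cs i j + 1 := by
        unfold hfun; rw [hg]; push_cast; ring
      rw [hh, ih (by omega)]
      conv_rhs => rw [Finset.sum_Ico_succ_top (by omega : i + 1 ≤ j + 1)]
      rw [if_pos (⟨heq, by have := rl_pos cs (j+1); omega⟩ :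
          cs.getD (j+1) ' ' = cs.getD i ' ' ∧ j + 1 < (j+1) + rl cs (j+1))]
      congr 1
      apply Finset.sum_congr rfl
      intro k hk
      have hk' := Finset.mem_Ico.mp hk
      by_cases hch : cs.getD k ' ' = cs.getD i ' '
      · by_cases hlt : j < k + rl cs k
        · have hcov : j + 1 < k + rl cs k := by
            rcases rl_stop cs k with hs | ⟨hs1, hs2⟩ | hs
            · omega
            · by_contra hcon
              have hEq : j + 1 = k + rl cs k := by omega
              apply hs2
              show lg cs (k + rl cs k) = lg cs k
              rw [← hEq]
              show cs.getD (j+1) ' ' = cs.getD k ' '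
              rw [heq, hch]
            · omega
          rw [if_pos ⟨hch, hlt⟩, if_pos ⟨hch, hcov⟩]
        · rw [if_neg (fun h => hlt (by omega)), if_neg (fun h => hlt (by have := h.2; omega))]
      · rw [if_neg (fun h => hch h.1), if_neg (fun h => hch h.1)]
    · have hg : gfun cs i (j+1) = ((j : Int) + 1) - (i : Int) := by
        rw [gfun_succ, if_neg (by omega), if_neg heq]
      have hh : hfun cs i (j+1) = 0 := by unfold hfun; rw [hg]; push_cast; ring
      rw [hh]
      symm
      apply Finset.sum_eq_zero
      intro k hk
      have hk' := Finset.mem_Ico.mp hk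
      apply if_neg
      intro hcond
      apply heq
      have hcov := rl_covers cs k (j+1) (by omega) hcond.2 hj1
      show cs.getD (j+1) ' ' = cs.getD i ' '
      calc cs.getD (j+1) ' ' = cs.getD k ' ' := hcov
        _ = cs.getD i ' ' := hcond.1

lemma sum_dist (cs : List Char) (i : Nat) (hi : i < cs.length) :
    ∑ j ∈ Finset.Ico i cs.length, ((j : Int) - (i : Int))
      = (((cs.length - 1 - i) * ((cs.length - 1 - i) + 1) / 2 : Nat) : Int) := by
  rw [Finset.sum_Ico_eq_sum_range]
  have h1 : ∀ k ∈ Finset.range (cs.length - i), ((i + k : Nat) : Int) - (i : Int) = (k : Int) := by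
    intro k _; push_cast; ring
  rw [Finset.sum_congr rfl h1, ← Nat.cast_sum, Finset.sum_range_id]
  congr 1
  have h2 : cs.length - i = (cs.length - 1 - i) + 1 := by omega
  rw [h2, Nat.add_sub_cancel, Nat.mul_comm]

lemma count_sum (cs : List Char) (c : Char) :
    ∀ k, k ≤ cs.length →
      ∑ i ∈ Finset.range k, (if cs.getD i ' ' = c then (1:Int) else 0)
        = (((cs.take k).count c : Nat) : Int) := by
  intro k
  induction k with
  | zero => simp
  | succ k ih =>
    intro hk
    rw [Finset.sum_range_succ, ih (by omega),
      List.take_succ_eq_append_getElem (by omega), List.count_append]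
    have hget : cs.getD k ' ' = cs[k]'(by omega) := List.getD_eq_getElem cs ' ' (by omega)
    rw [hget]
    by_cases hc : cs[k]'(by omega) = c
    · rw [if_pos hc, hc]
      simp
    · rw [if_neg hc]
      simp [hc]

lemma run_sum (cs : List Char) (k : Nat) (hk : k < cs.length) :
    ∑ j ∈ Finset.range cs.length, (if k ≤ j ∧ j < k + rl cs k then (1:Int) else 0)
      = ((rl cs k : Nat) : Int) := by
  have hsub : Finset.Ico k (k + rl cs k) ⊆ Finset.range cs.length := by
    intro x hx
    have := Finset.mem_Ico.mp hx
    have := rl_le cs k hk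
    exact Finset.mem_range.mpr (by omega)
  rw [← Finset.sum_subset hsub (by
    intro x _ hx
    apply if_neg
    intro h
    exact hx (Finset.mem_Ico.mpr ⟨h.1, h.2⟩))]
  have h1 : ∀ j ∈ Finset.Ico k (k + rl cs k),
      (if k ≤ j ∧ j < k + rl cs k then (1:Int) else 0) = 1 := by
    intro j hj
    have := Finset.mem_Ico.mp hj
    rw [if_pos ⟨this.1, this.2⟩]
  rw [Finset.sum_congr rfl h1, Finset.sum_const, Nat.card_Ico]
  simp

lemma triple_swap (cs : List Char) :
    ∑ i ∈ Finset.range cs.length, ∑ j ∈ Finset.Ico i cs.length, hfun cs i j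
      = ∑ k ∈ Finset.range cs.length,
          (rl cs k : Int) * ((cs.take k).count (cs.getD k ' ') : Int) := by
  have step1 : ∀ i ∈ Finset.range cs.length,
      ∑ j ∈ Finset.Ico i cs.length, hfun cs i j
        = ∑ j ∈ Finset.range cs.length, ∑ k ∈ Finset.range cs.length,
            (if i < k ∧ k ≤ j ∧ cs.getD k ' ' = cs.getD i ' ' ∧ j < k + rl cs k
             then (1:Int) else 0) := by
    intro i hi
    have hiN := Finset.mem_range.mp hi
    have hrow : ∀ j ∈ Finset.Ico i cs.length,
        hfun cs i j = ∑ k ∈ Finset.range cs.length,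
            (if i < k ∧ k ≤ j ∧ cs.getD k ' ' = cs.getD i ' ' ∧ j < k + rl cs k
             then (1:Int) else 0) := by
      intro j hj
      have hj' := Finset.mem_Ico.mp hj
      rw [hfun_count cs i j hj'.1 hj'.2]
      have e1 : ∀ k ∈ Finset.Ico (i+1) (j+1),
          (if cs.getD k ' ' = cs.getD i ' ' ∧ j < k + rl cs k then (1:Int) else 0)
            = (if i < k ∧ k ≤ j ∧ cs.getD k ' ' = cs.getD i ' ' ∧ j < k + rl cs k
               then (1:Int) else 0) := by
        intro k hk
        have hk' := Finset.mem_Ico.mp hk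
        by_cases hc : cs.getD k ' ' = cs.getD i ' ' ∧ j < k + rl cs k
        · rw [if_pos hc, if_pos ⟨by omega, by omega, hc.1, hc.2⟩]
        · rw [if_neg hc, if_neg (fun h => hc ⟨h.2.2.1, h.2.2.2⟩)]
      rw [Finset.sum_congr rfl e1]
      apply Finset.sum_subset
      · intro x hx
        have := Finset.mem_Ico.mp hx
        exact Finset.mem_range.mpr (by omega)
      · intro x _ hx
        apply if_neg
        intro h
        exact hx (Finset.mem_Ico.mpr ⟨by omega, by omega⟩)
    rw [Finset.sum_congr rfl hrow]
    apply Finset.sum_subset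
    · intro x hx
      have := Finset.mem_Ico.mp hx
      exact Finset.mem_range.mpr (by omega)
    · intro x hx hxn
      have hxi : x < i := by
        have h1 := Finset.mem_range.mp hx
        by_contra hcon
        exact hxn (Finset.mem_Ico.mpr ⟨by omega, h1⟩)
      apply Finset.sum_eq_zero
      intro k _
      apply if_neg
      intro h
      omega
  rw [Finset.sum_congr rfl step1]
  have e2 : ∀ i ∈ Finset.range cs.length,
      ∑ j ∈ Finset.range cs.length, ∑ k ∈ Finset.range cs.length,
          (if i < k ∧ k ≤ j ∧ cs.getD k ' ' = cs.getD i ' ' ∧ j < k + rl cs k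
           then (1:Int) else 0)
        = ∑ k ∈ Finset.range cs.length, ∑ j ∈ Finset.range cs.length,
          (if i < k ∧ k ≤ j ∧ cs.getD k ' ' = cs.getD i ' ' ∧ j < k + rl cs k
           then (1:Int) else 0) := fun i _ => Finset.sum_comm
  rw [Finset.sum_congr rfl e2, Finset.sum_comm]
  apply Finset.sum_congr rfl
  intro k hk
  have hkN := Finset.mem_range.mp hk
  have hsplit : ∀ i j : Nat,
      (if i < k ∧ k ≤ j ∧ cs.getD k ' ' = cs.getD i ' ' ∧ j < k + rl cs k
       then (1:Int) else 0)
        = (if i < k ∧ cs.getD k ' ' = cs.getD i ' ' then (1:Int) else 0)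
          * (if k ≤ j ∧ j < k + rl cs k then (1:Int) else 0) := by
    intro i j
    by_cases h1 : i < k ∧ cs.getD k ' ' = cs.getD i ' '
    · by_cases h2 : k ≤ j ∧ j < k + rl cs k
      · rw [if_pos ⟨h1.1, h2.1, h1.2, h2.2⟩, if_pos h1, if_pos h2, mul_one]
      · rw [if_neg (fun h => h2 ⟨h.2.1, h.2.2.2⟩), if_pos h1, if_neg h2, mul_zero]
    · rw [if_neg (fun h => h1 ⟨h.1, h.2.2.1⟩), if_neg h1, zero_mul]
  calc ∑ i ∈ Finset.range cs.length, ∑ j ∈ Finset.range cs.length,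
        (if i < k ∧ k ≤ j ∧ cs.getD k ' ' = cs.getD i ' ' ∧ j < k + rl cs k
         then (1:Int) else 0)
      = (∑ i ∈ Finset.range cs.length, (if i < k ∧ cs.getD k ' ' = cs.getD i ' ' then (1:Int) else 0))
        * (∑ j ∈ Finset.range cs.length, (if k ≤ j ∧ j < k + rl cs k then (1:Int) else 0)) := by
        rw [Finset.sum_mul_sum]
        apply Finset.sum_congr rfl
        intro i _
        apply Finset.sum_congr rfl
        intro j _
        exact hsplit i j
    _ = ((cs.take k).count (cs.getD k ' ') : Int) * ((rl cs k : Nat) : Int) := by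
        rw [run_sum cs k hkN]
        congr 1
        have hsub : Finset.range k ⊆ Finset.range cs.length := by
          intro x hx
          exact Finset.mem_range.mpr (by have := Finset.mem_range.mp hx; omega)
        have hz : ∀ x ∈ Finset.range cs.length, x ∉ Finset.range k →
            (if x < k ∧ cs.getD k ' ' = cs.getD x ' ' then (1:Int) else 0) = 0 := by
          intro x _ hxn
          apply if_neg
          intro h
          exact hxn (Finset.mem_range.mpr h.1)
        rw [← Finset.sum_subset hsub hz, ← count_sum cs (cs.getD k ' ') k (by omega)]
        apply Finset.sum_congr rfl
        intro i hi
        have := Finset.mem_range.mp hi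
        by_cases hc : cs.getD i ' ' = cs.getD k ' '
        · rw [if_pos hc, if_pos ⟨by omega, hc.symm⟩]
        · rw [if_neg hc, if_neg (fun h => hc h.2.symm)]
    _ = (rl cs k : Int) * ((cs.take k).count (cs.getD k ' ') : Int) := mul_comm _ _

lemma sumG_eq (cs : List Char) :
    sumG cs =
      (∑ m ∈ Finset.range cs.length, ((m * (m + 1) / 2 : Nat) : Int)) -
      ∑ k ∈ Finset.range cs.length,
        (rl cs k : Int) * ((cs.take k).count (lg cs k) : Int) := by
  unfold sumG
  have key : ∀ i ∈ Finset.range cs.length,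
      ∑ j ∈ Finset.Ico i cs.length, gfun cs i j
        = (((cs.length - 1 - i) * ((cs.length - 1 - i) + 1) / 2 : Nat) : Int)
          - ∑ j ∈ Finset.Ico i cs.length, hfun cs i j := by
    intro i hi
    rw [← sum_dist cs i (Finset.mem_range.mp hi), ← Finset.sum_sub_distrib]
    apply Finset.sum_congr rfl
    intro j _
    unfold hfun; ring
  rw [Finset.sum_congr rfl key, Finset.sum_sub_distrib,
    Finset.sum_range_reflect (fun m => ((m * (m + 1) / 2 : Nat) : Int)) cs.length,
    triple_swap]
  rfl

-- ===== VERDICT (by name: the statement is the Claim_ definition above) =====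
theorem solution_spec : Claim_equal_solution := by
  intro s _ _
  show solution s = solution_alt s
  rw [solutionA_eq, solutionB_eq, sumG_eq]
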